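-- pv_equiv track=rewrite | github.com/CameronDeweerd/Advent2021 | 3/aoc_2021_3.py | countPos
-- ===== SOURCE A (Python) =====
-- def countPos(numList, position, wantMost):
--     ones = []
--     zeros = []
--
--     for row in numList:
--         if row[position] == "1":
--             ones.append(row)
--         else:
--             zeros.append(row)
--     if len(ones) >= len(zeros):
--         if wantMost:
--             return ones
--         else:
--             return zeros
--     else:
--         if wantMost:
--             return zeros
--         else:
--             return ones
-- ===== SOURCE B (Python) =====
-- def countPos(numList, position, wantMost):
--     ones = sum(1 for row in numList if row[position] == "1")
--     keep_one = (2 * ones >= len(numList)) == wantMost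
--     return [row for row in numList if (row[position] == "1") == keep_one]
-- ===== Notes on version B (the rewrite author's own statement) =====
-- stated objective: simpler
-- what changed: Replaces the two accumulator lists and the four-way branch with a single integer count of '1'-rows, a boolean-equality derivation of the target bit, and one filtering comprehension.
import Mathlib
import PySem

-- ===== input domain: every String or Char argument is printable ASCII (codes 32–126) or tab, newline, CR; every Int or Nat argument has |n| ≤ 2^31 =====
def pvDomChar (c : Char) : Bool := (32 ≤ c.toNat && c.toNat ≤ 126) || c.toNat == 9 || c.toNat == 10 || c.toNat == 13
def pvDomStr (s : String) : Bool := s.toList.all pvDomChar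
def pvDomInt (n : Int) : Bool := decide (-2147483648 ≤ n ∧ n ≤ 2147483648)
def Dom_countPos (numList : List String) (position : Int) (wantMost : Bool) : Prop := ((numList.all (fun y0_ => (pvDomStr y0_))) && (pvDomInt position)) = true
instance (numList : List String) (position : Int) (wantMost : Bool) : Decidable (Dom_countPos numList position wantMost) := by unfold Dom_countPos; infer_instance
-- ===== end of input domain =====

-- B replaces A's two accumulator lists and four-way branch by one '1'-count, a derived target bit, and a single filter (same behaviour, simpler decomposition).


-- ===== PORT A =====
-- the for-loop of A: appends each row to ones or zeros depending on row[position] == "1"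
def countPosLoop (position : Int) : List String → List String → List String → (List String × List String)
  | [], ones, zeros => (ones, zeros)
  | row :: rest, ones, zeros =>
    if PySem.Str.pyGet? row position = some '1'
    then countPosLoop position rest (ones ++ [row]) zeros
    else countPosLoop position rest ones (zeros ++ [row])

def countPos (numList : List String) (position : Int) (wantMost : Bool) : List String :=
  let oz := countPosLoop position numList [] []
  let ones := oz.1
  let zeros := oz.2
  if ones.length ≥ zeros.length then
    if wantMost then ones else zeros
  else
    if wantMost then zeros else ones

-- ===== PORT B =====
def countPos_alt (numList : List String) (position : Int) (wantMost : Bool) : List String :=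
  let ones := numList.foldl (fun acc row => if PySem.Str.pyGet? row position = some '1' then acc + 1 else acc) 0
  let keepOne := (decide (2 * ones ≥ numList.length)) == wantMost
  numList.filter (fun row => (decide (PySem.Str.pyGet? row position = some '1')) == keepOne)

-- ===== PRECONDITION & SPEC =====
-- Pre_ excludes exactly the inputs where Python's row[position] raises IndexError (position out of range for some row)
def Pre_countPos (numList : List String) (position : Int) (wantMost : Bool) : Prop :=
  ∀ row ∈ numList, PySem.Raise.InRange row.toList.length position
instance (numList : List String) (position : Int) (wantMost : Bool) : Decidable (Pre_countPos numList position wantMost) := by unfold Pre_countPos; infer_instance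

def pvWitness_countPos : List String × Int × Bool := (["10", "01", "11"], 0, true)

def Spec_countPos (numList : List String) (position : Int) (wantMost : Bool) (out : List String) : Prop := out = countPos_alt numList position wantMost
instance (numList : List String) (position : Int) (wantMost : Bool) (out : List String) : Decidable (Spec_countPos numList position wantMost out) := by unfold Spec_countPos; infer_instance

-- ===== CLAIM (what is proved, stated in full; the proofs are below) =====
def Claim_equal_countPos : Prop := ∀ (numList : List String) (position : Int) (wantMost : Bool), Dom_countPos numList position wantMost → Pre_countPos numList position wantMost → Spec_countPos numList position wantMost (countPos numList position wantMost)

-- ===== LEMMAS AND PROOFS =====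

theorem countPosLoop_eq (position : Int) (l ones zeros : List String) :
    countPosLoop position l ones zeros =
      (ones ++ l.filter (fun row => decide (PySem.Str.pyGet? row position = some '1')),
       zeros ++ l.filter (fun row => !decide (PySem.Str.pyGet? row position = some '1'))) := by
  induction l generalizing ones zeros with
  | nil => simp [countPosLoop]
  | cons row rest ih =>
    by_cases h : PySem.List.pyGet? row.toList position = some '1' <;>
      simp [countPosLoop, h, ih, List.filter_cons]

theorem countPos_foldl_eq (position : Int) (l : List String) (acc : Nat) :
    l.foldl (fun acc row => if PySem.Str.pyGet? row position = some '1' then acc + 1 else acc) acc =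
      acc + l.countP (fun row => decide (PySem.Str.pyGet? row position = some '1')) := by
  induction l generalizing acc with
  | nil => simp
  | cons row rest ih =>
    simp only [List.foldl_cons, List.countP_cons]
    rw [ih]
    by_cases h : PySem.List.pyGet? row.toList position = some '1' <;> simp [h] <;> omega

-- ===== VERDICT (by name: the statement is the Claim_ definition above) =====
theorem countPos_spec : Claim_equal_countPos := by
  intro numList position wantMost _ _
  unfold Spec_countPos countPos countPos_alt
  simp only [countPosLoop_eq, List.nil_append]
  have key : ((List.filter (fun row => !decide (PySem.Str.pyGet? row position = some '1')) numList).length ≤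
        (List.filter (fun row => decide (PySem.Str.pyGet? row position = some '1')) numList).length) ↔
      (numList.length ≤ 2 * List.foldl
        (fun acc row => if PySem.Str.pyGet? row position = some '1' then acc + 1 else acc) 0 numList) := by
    rw [countPos_foldl_eq, ← List.countP_eq_length_filter, ← List.countP_eq_length_filter]
    have h := List.length_eq_countP_add_countP
      (l := numList) (p := fun row => decide (PySem.Str.pyGet? row position = some '1'))
    simp only [decide_not, Bool.decide_eq_true] at h
    omega
  split_ifs with h1 h2 h2
  · refine Eq.symm (List.filter_congr fun a _ => ?_)
    rw [h2, decide_eq_true (key.mp h1)]; simp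
  · have hw : wantMost = false := by cases wantMost <;> simp_all
    refine Eq.symm (List.filter_congr fun a _ => ?_)
    rw [hw, decide_eq_true (key.mp h1)]; simp
  · have hn : ¬ numList.length ≤ 2 * List.foldl
        (fun acc row => if PySem.Str.pyGet? row position = some '1' then acc + 1 else acc) 0 numList :=
      fun hh => h1 (key.mpr hh)
    refine Eq.symm (List.filter_congr fun a _ => ?_)
    rw [h2, decide_eq_false hn]; simp
  · have hn : ¬ numList.length ≤ 2 * List.foldl
        (fun acc row => if PySem.Str.pyGet? row position = some '1' then acc + 1 else acc) 0 numList :=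
      fun hh => h1 (key.mpr hh)
    have hw : wantMost = false := by cases wantMost <;> simp_all
    refine Eq.symm (List.filter_congr fun a _ => ?_)
    rw [hw, decide_eq_false hn]; simp
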